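-- pv_equiv track=rewrite | github.com/faisalkindi/CrimsonDesert-UltimateModsManager | src/cdumm/engine/html_patch_handler.py | _find_end_directive
-- ===== SOURCE A (Python) =====
-- def _find_end_directive(content: str, frm: int) -> int:
--     n = len(content)
--     i = frm
--     while i < n:
--         start = content.find("<!--", i)
--         if start < 0:
--             return -1
--         end = content.find("-->", start + 4)
--         if end < 0:
--             return -1
--         if content[start + 4:end].strip().lower() == "@end":
--             return start
--         i = end + 3
--     return -1
-- ===== SOURCE B (Python) =====
-- def _find_end_directive(content: str, frm: int) -> int:
--     n = len(content)
--     i = max(0, n + frm) if frm < 0 else frm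
--     in_comment = False
--     start = 0
--     while i < n:
--         if in_comment:
--             if content[i:i+3] == "-->":
--                 if content[start+4:i].strip().lower() == "@end":
--                     return start
--                 in_comment = False
--                 i += 3
--             else:
--                 i += 1
--         else:
--             if content[i:i+4] == "<!--":
--                 start = i
--                 in_comment = True
--                 i += 4
--             else:
--                 i += 1
--     return -1
-- ===== Notes on version B (the rewrite author's own statement) =====
-- stated objective: alternative
-- what changed: Replaces the paired str.find index-jumping loop with a single left-to-right character-position state machine (outside/inside-comment states) that normalizes a negative start once and never calls find.
import Mathlib
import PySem

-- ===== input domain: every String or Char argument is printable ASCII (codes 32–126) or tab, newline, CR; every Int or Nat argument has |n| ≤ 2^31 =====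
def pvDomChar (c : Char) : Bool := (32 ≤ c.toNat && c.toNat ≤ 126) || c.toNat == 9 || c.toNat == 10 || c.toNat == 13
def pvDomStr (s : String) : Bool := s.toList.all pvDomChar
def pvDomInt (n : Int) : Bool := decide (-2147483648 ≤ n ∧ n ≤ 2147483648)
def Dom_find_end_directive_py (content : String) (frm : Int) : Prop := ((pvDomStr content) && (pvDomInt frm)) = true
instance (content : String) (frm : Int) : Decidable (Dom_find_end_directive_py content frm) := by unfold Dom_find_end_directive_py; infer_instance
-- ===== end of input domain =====

-- B replaces A's paired str.find index-jumping loop with a single left-to-right two-state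
-- character scanner (outside/inside comment) after normalizing a negative start once: alternative
-- structure, same exact return value.

-- facts about PySem.Chars.findFrom the A-port's termination proof cites by name
theorem pvFindFrom_ge (cs sub : List Char) (a : Int) (h0 : 0 ≤ a)
    (h : PySem.Chars.findFrom cs sub a none ≠ -1) :
    a ≤ PySem.Chars.findFrom cs sub a none := by
  have key : ∀ (L : List Char), -1 ≤ PySem.Chars.find L sub := fun L => PySem.Chars.neg_one_le_find L sub
  simp only [PySem.Chars.findFrom] at h ⊢
  split_ifs at h ⊢ <;> first | omega | (exact le_add_of_nonneg_right (by have := key (List.drop a.toNat (List.take (↑cs.length : Int).toNat cs)); omega))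

-- ===== PORT A =====
-- the while-loop of A: i jumps by paired find("<!--", i) / find("-->", start+4) calls
def pvALoop (cs : List Char) (i : Int) : Int :=
  if _h : i < (cs.length : Int) then
    let start := PySem.Chars.findFrom cs "<!--".toList i none
    if hs : start < 0 then -1
    else
      let e := PySem.Chars.findFrom cs "-->".toList (start + 4) none
      if he : e < 0 then -1
      else if PySem.Chars.lower (PySem.Chars.strip (PySem.Chars.slice cs (some (start + 4)) (some e))) = "@end".toList then start
      else pvALoop cs (e + 3)
  else -1
termination_by ((cs.length : Int) - i).toNat
decreasing_by
  have hs' : ¬ PySem.Chars.findFrom cs "<!--".toList i none < 0 := hs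
  have he' : ¬ PySem.Chars.findFrom cs "-->".toList (PySem.Chars.findFrom cs "<!--".toList i none + 4) none < 0 := he
  have hge : PySem.Chars.findFrom cs "<!--".toList i none + 4 ≤
      PySem.Chars.findFrom cs "-->".toList (PySem.Chars.findFrom cs "<!--".toList i none + 4) none :=
    pvFindFrom_ge cs "-->".toList _ (by omega) (by omega)
  by_cases hi : 0 ≤ i
  · have := pvFindFrom_ge cs "<!--".toList i hi (by omega)
    omega
  · omega

def find_end_directive_py (content : String) (frm : Int) : Int :=
  pvALoop content.toList frm

-- ===== PORT B =====
-- the while-loop of B: single pass, one position at a time, in_comment/start state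
def pvBLoop (cs : List Char) (i : Nat) (inComment : Bool) (start : Nat) : Int :=
  if i < cs.length then
    if inComment then
      if PySem.Chars.slice cs (some (i : Int)) (some ((i : Int) + 3)) = "-->".toList then
        if PySem.Chars.lower (PySem.Chars.strip (PySem.Chars.slice cs (some ((start : Int) + 4)) (some (i : Int)))) = "@end".toList then (start : Int)
        else pvBLoop cs (i + 3) false start
      else pvBLoop cs (i + 1) true start
    else
      if PySem.Chars.slice cs (some (i : Int)) (some ((i : Int) + 4)) = "<!--".toList then pvBLoop cs (i + 4) true i
      else pvBLoop cs (i + 1) false start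
  else -1
termination_by cs.length - i

def find_end_directive_py_alt (content : String) (frm : Int) : Int :=
  let cs := content.toList
  let n : Int := cs.length
  let i0 : Int := if frm < 0 then max 0 (n + frm) else frm
  pvBLoop cs i0.toNat false 0

-- ===== PRECONDITION & SPEC =====
def Spec_find_end_directive_py (content : String) (frm : Int) (out : Int) : Prop := out = find_end_directive_py_alt content frm
instance (content : String) (frm : Int) (out : Int) : Decidable (Spec_find_end_directive_py content frm out) := by unfold Spec_find_end_directive_py; infer_instance

-- ===== CLAIM (what is proved, stated in full; the proofs are below) =====
def Claim_equal_find_end_directive_py : Prop := ∀ (content : String) (frm : Int), Dom_find_end_directive_py content frm → Spec_find_end_directive_py content frm (find_end_directive_py content frm)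

-- ===== LEMMAS AND PROOFS =====

theorem pvFindFrom_nonneg (cs sub : List Char) (a : Int)
    (h : PySem.Chars.findFrom cs sub a none ≠ -1) :
    0 ≤ PySem.Chars.findFrom cs sub a none := by
  have key : ∀ (L : List Char), -1 ≤ PySem.Chars.find L sub := fun L => PySem.Chars.neg_one_le_find L sub
  simp only [PySem.Chars.findFrom] at h ⊢
  split_ifs at h ⊢ <;>
    (try omega) <;>
    (have k1 := key (List.drop (a + ↑cs.length).toNat (List.take (↑cs.length : Int).toNat cs))
     have k2 := key (List.drop a.toNat (List.take (↑cs.length : Int).toNat cs))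
     have k3 := key (List.drop (Int.toNat 0) (List.take (↑cs.length : Int).toNat cs))
     omega)


-- a slice cs[i:i+k] equals sub (of length k) iff sub is a prefix of cs.drop i
theorem pvSlice_eq_iff (cs sub : List Char) (i k : Nat) (b : Int)
    (hb : b = (i : Int) + (k : Int)) (hk : sub.length = k) :
    (PySem.Chars.slice cs (some (i : Int)) (some b) = sub) ↔ sub <+: cs.drop i := by
  subst hb; subst hk
  rw [PySem.Chars.slice_eq_listSlice, PySem.List.slice_natCast_add]
  rw [List.prefix_iff_eq_take]
  exact eq_comm

-- find on a cons with no prefix at the head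
theorem pvFind_cons (c : Char) (t sub : List Char) (hnp : ¬ sub <+: (c :: t)) :
    PySem.Chars.find (c :: t) sub =
      (if PySem.Chars.find t sub = -1 then -1 else 1 + PySem.Chars.find t sub) := by
  by_cases hin : sub <:+: (c :: t)
  · have h0 : 0 ≤ PySem.Chars.find (c :: t) sub := (PySem.Chars.find_nonneg_iff _ _).mpr hin
    obtain ⟨hpre, hmin⟩ := PySem.Chars.find_spec h0
    have hne0 : (PySem.Chars.find (c :: t) sub).toNat ≠ 0 := by
      intro h; rw [h] at hpre; simp at hpre; exact hnp hpre
    have hp' : sub <+: t.drop ((PySem.Chars.find (c :: t) sub).toNat - 1) := by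
      have : (PySem.Chars.find (c :: t) sub).toNat = ((PySem.Chars.find (c :: t) sub).toNat - 1) + 1 := by omega
      rw [this] at hpre
      simpa [List.drop_succ_cons] using hpre
    have hint : sub <:+: t := by
      rw [← PySem.Chars.isIn_iff_infix, ← PySem.Chars.exists_prefix_drop_iff_isIn]
      exact ⟨_, hp'⟩
    have h0t : 0 ≤ PySem.Chars.find t sub := (PySem.Chars.find_nonneg_iff _ _).mpr hint
    obtain ⟨hpret, hmint⟩ := PySem.Chars.find_spec h0t
    have h1 : (PySem.Chars.find t sub).toNat ≤ (PySem.Chars.find (c :: t) sub).toNat - 1 := by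
      by_contra hlt
      exact hmint _ (by omega) hp'
    have h2 : (PySem.Chars.find (c :: t) sub).toNat ≤ (PySem.Chars.find t sub).toNat + 1 := by
      by_contra hlt
      exact hmin ((PySem.Chars.find t sub).toNat + 1) (by omega) (by simpa [List.drop_succ_cons] using hpret)
    rw [if_neg (by omega)]
    omega
  · have hint : ¬ sub <:+: t := fun h => hin (h.trans (List.suffix_cons c t).isInfix)
    rw [(PySem.Chars.find_eq_neg_one_iff _ _).mpr hin, (PySem.Chars.find_eq_neg_one_iff _ _).mpr hint]
    simp

-- findFrom at an index where sub is a prefix returns that index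
theorem pvFindFrom_at (cs sub : List Char) (i : Nat) (hp : sub <+: cs.drop i) (hne : sub ≠ []) :
    PySem.Chars.findFrom cs sub (i : Int) none = (i : Int) := by
  have hi : i < cs.length := by
    by_contra h
    rw [List.drop_eq_nil_of_le (by omega)] at hp
    exact hne (List.prefix_nil.mp hp)
  rw [PySem.Chars.findFrom_natCast cs sub i (by omega)]
  have h0 : 0 ≤ PySem.Chars.find (cs.drop i) sub :=
    (PySem.Chars.find_nonneg_iff _ _).mpr hp.isInfix
  obtain ⟨_, hmin⟩ := PySem.Chars.find_spec h0
  have : (PySem.Chars.find (cs.drop i) sub).toNat = 0 := by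
    by_contra h
    exact hmin 0 (by omega) (by simpa using hp)
  have hz : PySem.Chars.find (cs.drop i) sub = 0 := by omega
  rw [hz]
  simp

-- findFrom skips a position where sub is not a prefix
theorem pvFindFrom_succ (cs sub : List Char) (i : Nat) (hi : i < cs.length)
    (hnp : ¬ sub <+: cs.drop i) :
    PySem.Chars.findFrom cs sub (i : Int) none = PySem.Chars.findFrom cs sub ((i + 1 : Nat) : Int) none := by
  rw [PySem.Chars.findFrom_natCast cs sub i (by omega),
      PySem.Chars.findFrom_natCast cs sub (i + 1) (by omega)]
  have hdrop : cs.drop i = cs[i] :: cs.drop (i + 1) := List.drop_eq_getElem_cons hi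
  rw [hdrop] at hnp ⊢
  rw [pvFind_cons _ _ _ hnp]
  have := PySem.Chars.neg_one_le_find (cs.drop (i+1)) sub
  push_cast
  split_ifs <;> omega

-- findFrom from a start past the end finds nothing (nonempty sub)
theorem pvFindFrom_past (cs sub : List Char) (i : Nat) (hi : cs.length ≤ i) (hne : sub ≠ []) :
    PySem.Chars.findFrom cs sub (i : Int) none = -1 := by
  simp only [PySem.Chars.findFrom]
  have hd : List.drop (i : Int).toNat (List.take ((cs.length : Nat) : Int).toNat cs) = [] := by
    apply List.drop_eq_nil_of_le
    simp
    omega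
  split_ifs with h1 h2 h3 <;> try rfl
  all_goals try omega
  all_goals
    (exfalso
     rw [hd, (PySem.Chars.find_eq_neg_one_iff _ _).mpr (by simp [hne])] at *
     omega)

-- a negative start is normalized to max 0 (n + a)
theorem pvFindFrom_neg (cs sub : List Char) (a : Int) (ha : a < 0) :
    PySem.Chars.findFrom cs sub a none = PySem.Chars.findFrom cs sub (max 0 ((cs.length : Int) + a)) none := by
  simp only [PySem.Chars.findFrom]
  have hst : (if a < 0 then if a + (cs.length : Int) < 0 then 0 else a + cs.length else a) =
      (if max 0 ((cs.length : Int) + a) < 0 then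
        (if max 0 ((cs.length : Int) + a) + cs.length < 0 then 0 else max 0 ((cs.length : Int) + a) + cs.length)
       else max 0 ((cs.length : Int) + a)) := by
    split_ifs <;> omega
  rw [hst]

-- B's search state (inComment = false) computes find("<!--", i) and hands over
theorem pvState0 (cs : List Char) (i st : Nat) :
    pvBLoop cs i false st =
      (if PySem.Chars.findFrom cs "<!--".toList (i : Int) none = -1 then -1
       else pvBLoop cs ((PySem.Chars.findFrom cs "<!--".toList (i : Int) none).toNat + 4) true
              (PySem.Chars.findFrom cs "<!--".toList (i : Int) none).toNat) := by
  have H : ∀ (k i st : Nat), cs.length - i ≤ k →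
      pvBLoop cs i false st =
        (if PySem.Chars.findFrom cs "<!--".toList (i : Int) none = -1 then -1
         else pvBLoop cs ((PySem.Chars.findFrom cs "<!--".toList (i : Int) none).toNat + 4) true
                (PySem.Chars.findFrom cs "<!--".toList (i : Int) none).toNat) := by
    intro k
    induction k with
    | zero =>
      intro i st h
      rw [pvBLoop, if_neg (by omega), pvFindFrom_past cs _ i (by omega) (by decide), if_pos rfl]
    | succ k ih =>
      intro i st h
      by_cases hi : i < cs.length
      · rw [pvBLoop, if_pos hi]
        simp only [Bool.false_eq_true, if_false]
        by_cases hp : "<!--".toList <+: cs.drop i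
        · rw [if_pos ((pvSlice_eq_iff cs _ i 4 _ (by push_cast; ring) rfl).mpr hp)]
          rw [pvFindFrom_at cs _ i hp (by decide),
              if_neg (show ¬((i : Nat) : Int) = -1 by omega), Int.toNat_natCast]
        · rw [if_neg (fun hc => hp ((pvSlice_eq_iff cs _ i 4 _ (by push_cast; ring) rfl).mp hc))]
          rw [pvFindFrom_succ cs _ i hi hp]
          exact ih (i + 1) st (by omega)
      · rw [pvBLoop, if_neg hi, pvFindFrom_past cs _ i (by omega) (by decide), if_pos rfl]
  exact H cs.length i st (by omega)

-- B's in-comment state (inComment = true) computes find("-->", j) and decides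
theorem pvState1 (cs : List Char) (j st : Nat) :
    pvBLoop cs j true st =
      (if PySem.Chars.findFrom cs "-->".toList (j : Int) none = -1 then -1
       else if PySem.Chars.lower (PySem.Chars.strip (PySem.Chars.slice cs (some ((st : Int) + 4))
                  (some (PySem.Chars.findFrom cs "-->".toList (j : Int) none)))) = "@end".toList then (st : Int)
       else pvBLoop cs ((PySem.Chars.findFrom cs "-->".toList (j : Int) none).toNat + 3) false st) := by
  have H : ∀ (k j : Nat), cs.length - j ≤ k →
      pvBLoop cs j true st =
        (if PySem.Chars.findFrom cs "-->".toList (j : Int) none = -1 then -1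
         else if PySem.Chars.lower (PySem.Chars.strip (PySem.Chars.slice cs (some ((st : Int) + 4))
                    (some (PySem.Chars.findFrom cs "-->".toList (j : Int) none)))) = "@end".toList then (st : Int)
         else pvBLoop cs ((PySem.Chars.findFrom cs "-->".toList (j : Int) none).toNat + 3) false st) := by
    intro k
    induction k with
    | zero =>
      intro j h
      rw [pvBLoop, if_neg (by omega), pvFindFrom_past cs _ j (by omega) (by decide), if_pos rfl]
    | succ k ih =>
      intro j h
      by_cases hj : j < cs.length
      · rw [pvBLoop, if_pos hj]
        simp only [if_true]
        by_cases hp : "-->".toList <+: cs.drop j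
        · rw [if_pos ((pvSlice_eq_iff cs _ j 3 _ (by push_cast; ring) rfl).mpr hp)]
          rw [pvFindFrom_at cs _ j hp (by decide),
              if_neg (show ¬((j : Nat) : Int) = -1 by omega), Int.toNat_natCast]
        · rw [if_neg (fun hc => hp ((pvSlice_eq_iff cs _ j 3 _ (by push_cast; ring) rfl).mp hc))]
          rw [pvFindFrom_succ cs _ j hj hp]
          exact ih (j + 1) (by omega)
      · rw [pvBLoop, if_neg hj, pvFindFrom_past cs _ j (by omega) (by decide), if_pos rfl]
  exact H cs.length j (by omega)

-- the two loops agree from any nonnegative position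
theorem pvMain (cs : List Char) : ∀ (k i st : Nat), cs.length - i ≤ k →
    pvBLoop cs i false st = pvALoop cs (i : Int) := by
  intro k
  induction k with
  | zero =>
    intro i st h
    rw [pvState0, pvFindFrom_past cs _ i (by omega) (by decide), if_pos rfl,
        pvALoop, dif_neg (by omega)]
  | succ k ih =>
    intro i st h
    by_cases hi : i < cs.length
    · rw [pvState0, pvALoop, dif_pos (show ((i : Nat) : Int) < (cs.length : Int) by omega)]
      simp only []
      by_cases hfs : PySem.Chars.findFrom cs "<!--".toList ((i : Nat) : Int) none = -1
      · rw [if_pos hfs, dif_pos (by rw [hfs]; norm_num)]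
      · have h0 := pvFindFrom_nonneg cs "<!--".toList ((i : Nat) : Int) hfs
        have h1 := pvFindFrom_ge cs "<!--".toList ((i : Nat) : Int) (by omega) hfs
        rw [if_neg hfs, dif_neg (by omega), pvState1]
        generalize hsdef : PySem.Chars.findFrom cs "<!--".toList ((i : Nat) : Int) none = s at h0 h1 ⊢
        have hc : ((s.toNat + 4 : Nat) : Int) = s + 4 := by omega
        have hc' : ((s.toNat : Nat) : Int) = s := by omega
        rw [hc, hc']
        by_cases hfe : PySem.Chars.findFrom cs "-->".toList (s + 4) none = -1
        · rw [if_pos hfe, dif_pos (by rw [hfe]; norm_num)]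
        · have he0 := pvFindFrom_nonneg cs "-->".toList (s + 4) hfe
          have he1 := pvFindFrom_ge cs "-->".toList (s + 4) (by omega) hfe
          rw [if_neg hfe, dif_neg (by omega)]
          by_cases hchk : PySem.Chars.lower (PySem.Chars.strip (PySem.Chars.slice cs (some (s + 4))
              (some (PySem.Chars.findFrom cs "-->".toList (s + 4) none)))) = "@end".toList
          · rw [if_pos hchk, if_pos hchk]
          · rw [if_neg hchk, if_neg hchk]
            have hc3 : (((PySem.Chars.findFrom cs "-->".toList (s + 4) none).toNat + 3 : Nat) : Int) =
                PySem.Chars.findFrom cs "-->".toList (s + 4) none + 3 := by omega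
            calc pvBLoop cs ((PySem.Chars.findFrom cs "-->".toList (s + 4) none).toNat + 3) false s.toNat
                = pvALoop cs (((PySem.Chars.findFrom cs "-->".toList (s + 4) none).toNat + 3 : Nat) : Int) :=
                  ih _ _ (by omega)
              _ = pvALoop cs (PySem.Chars.findFrom cs "-->".toList (s + 4) none + 3) := by rw [hc3]
    · rw [pvState0, pvFindFrom_past cs _ i (by omega) (by decide), if_pos rfl,
          pvALoop, dif_neg (by omega)]

-- A's loop started at a negative index equals A's loop at the normalized index
theorem pvALoop_neg (cs : List Char) (a : Int) (ha : a < 0) :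
    pvALoop cs a = pvALoop cs (max 0 ((cs.length : Int) + a)) := by
  have hclamp := pvFindFrom_neg cs "<!--".toList a ha
  by_cases hml : max 0 ((cs.length : Int) + a) < cs.length
  · rw [pvALoop, dif_pos (show a < (cs.length : Int) by omega)]
    conv_rhs => rw [pvALoop]
    rw [dif_pos hml]
    simp only []
    rw [hclamp]
  · have hn : cs.length = 0 := by omega
    have hm0 : max 0 ((cs.length : Int) + a) = 0 := by omega
    have hp : PySem.Chars.findFrom cs "<!--".toList (0 : Int) none = -1 := by
      have := pvFindFrom_past cs "<!--".toList 0 (by omega) (by decide)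
      simpa using this
    rw [pvALoop, dif_pos (show a < (cs.length : Int) by omega)]
    conv_rhs => rw [pvALoop]
    rw [dif_neg hml]
    simp only []
    rw [hclamp, hm0, dif_pos (by rw [hp]; norm_num)]

-- ===== VERDICT (by name: the statement is the Claim_ definition above) =====
theorem find_end_directive_py_spec : Claim_equal_find_end_directive_py := by
  intro content frm _
  unfold Spec_find_end_directive_py find_end_directive_py find_end_directive_py_alt
  simp only []
  by_cases hf : frm < 0
  · rw [if_pos hf, pvALoop_neg content.toList frm hf]
    have hc : (((max 0 ((content.toList.length : Int) + frm)).toNat : Nat) : Int) =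
        max 0 ((content.toList.length : Int) + frm) := by omega
    exact ((pvMain content.toList content.toList.length _ 0 (by omega)).trans (by rw [hc])).symm
  · rw [if_neg hf]
    have hc : ((frm.toNat : Nat) : Int) = frm := by omega
    exact ((pvMain content.toList content.toList.length frm.toNat 0 (by omega)).trans (by rw [hc])).symm
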